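-- pv_equiv track=rewrite | github.com/RMalsonR/Crypt | Permutation Ciphers/magic_squares_cipher.py | create_intermediate_table
-- ===== SOURCE A (Python) =====
-- def create_intermediate_table(table, word):
--     result = [['.' for i in range(4)] for i in range(4)]
--     for idx, val in enumerate(word):
--         for idx_i, val_i in enumerate(table):
--             for idx_j, val_j in enumerate(val_i):
--                 if val_j == idx+1:
--                     result[idx_i][idx_j] = val
--     return result
-- ===== SOURCE B (Python) =====
-- def create_intermediate_table(table, word):
--     # One pass over the 4x4 output grid: each cell (i, j) holds word[table[i][j]-1]
--     # when that table value is a valid 1-based index into word, else '.'.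
--     result = []
--     for i in range(4):
--         row_out = []
--         for j in range(4):
--             ch = '.'
--             if i < len(table):
--                 row = table[i]
--                 if j < len(row):
--                     v = row[j]
--                     if 1 <= v <= len(word):
--                         ch = word[v - 1]
--             row_out.append(ch)
--         result.append(row_out)
--     return result
-- ===== Notes on version B (the rewrite author's own statement) =====
-- stated objective: faster
-- what changed: Instead of scanning the whole table once per character of word (nested word x rows x cols loops with in-place writes), B makes a single pass over the fixed 4x4 output grid, computing each cell directly as word[table[i][j]-1] when that value is a valid 1-based index into word, else '.'.
import Mathlib
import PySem

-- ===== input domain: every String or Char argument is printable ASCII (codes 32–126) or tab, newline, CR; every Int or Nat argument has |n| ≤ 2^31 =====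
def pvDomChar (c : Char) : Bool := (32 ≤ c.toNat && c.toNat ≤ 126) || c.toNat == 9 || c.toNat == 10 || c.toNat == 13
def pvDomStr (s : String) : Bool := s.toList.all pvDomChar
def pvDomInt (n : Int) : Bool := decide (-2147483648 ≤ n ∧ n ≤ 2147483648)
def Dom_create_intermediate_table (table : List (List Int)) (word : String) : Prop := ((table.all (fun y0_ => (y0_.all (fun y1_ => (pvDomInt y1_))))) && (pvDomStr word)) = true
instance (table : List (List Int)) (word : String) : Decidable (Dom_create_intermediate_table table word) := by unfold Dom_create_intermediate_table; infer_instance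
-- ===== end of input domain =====

-- B replaces A's per-character full-table scan by one direct pass over the fixed
-- 4x4 output grid (objective: faster; equality proved on Pre_, where A returns).

-- ===== PORT A =====
-- Literal port of A: result = 4x4 of '.'; triple nested enumerate loops; the
-- in-place assignment result[i][j] = val becomes List.modify/List.set (a no-op
-- exactly where Python raises IndexError, which Pre_ excludes).
def create_intermediate_table (table : List (List Int)) (word : String) : List (List String) :=
  let init := List.replicate 4 (List.replicate 4 ".")
  (PySem.List.enumerate word.toList 0).foldl (fun result p =>
    (PySem.List.enumerate table 0).foldl (fun result q =>
      (PySem.List.enumerate q.2 0).foldl (fun result r =>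
        if r.2 = p.1 + 1 then
          result.modify q.1.toNat (fun row => row.set r.1.toNat (String.mk [p.2]))
        else result) result) result) init

-- ===== PORT B =====
-- Literal port of B (Source B): for each of the 16 grid cells, look the value up in
-- the table (bounds-checked) and take word[v-1] when 1 <= v <= len(word), else '.'.
def create_intermediate_table_alt (table : List (List Int)) (word : String) : List (List String) :=
  (List.range 4).map (fun i =>
    (List.range 4).map (fun j =>
      if hi : i < table.length then
        let row := table[i]
        if hj : j < row.length then
          let v := row[j]
          if 1 ≤ v ∧ v ≤ (word.toList.length : Int) then
            String.mk [word.toList[(v - 1).toNat]!]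
          else "."
        else "."
      else "."))

-- ===== PRECONDITION & SPEC =====
-- Pre_ excludes exactly the inputs where A raises IndexError: some table value in
-- [1, len(word)] located at row index >= 4 or column index >= 4.
def Pre_create_intermediate_table (table : List (List Int)) (word : String) : Prop :=
  ∀ i, (hi : i < table.length) → ∀ j, (hj : j < table[i].length) →
    1 ≤ table[i][j] → table[i][j] ≤ (word.toList.length : Int) → i < 4 ∧ j < 4
instance (table : List (List Int)) (word : String) : Decidable (Pre_create_intermediate_table table word) := by unfold Pre_create_intermediate_table; infer_instance

def pvWitness_create_intermediate_table : List (List Int) × String :=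
  ([[1, 2, 3, 4], [5, 6, 7, 8], [9, 10, 11, 12], [13, 14, 15, 16]], "abcde")

def Spec_create_intermediate_table (table : List (List Int)) (word : String) (out : List (List String)) : Prop := out = create_intermediate_table_alt table word
instance (table : List (List Int)) (word : String) (out : List (List String)) : Decidable (Spec_create_intermediate_table table word out) := by unfold Spec_create_intermediate_table; infer_instance

-- ===== CLAIM (what is proved, stated in full; the proofs are below) =====
def Claim_equal_create_intermediate_table : Prop := ∀ (table : List (List Int)) (word : String), Dom_create_intermediate_table table word → Pre_create_intermediate_table table word → Spec_create_intermediate_table table word (create_intermediate_table table word)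


-- ===== LEMMAS AND PROOFS =====

-- A 4x4 grid given by a cell function.
def pvGrid (f : Nat → Nat → String) : List (List String) :=
  (List.range 4).map (fun i => (List.range 4).map (fun j => f i j))

-- matchRow row k j t : does row (whose cells occupy columns k, k+1, …) hold t at column j?
def pvMatchRow : List Int → Nat → Nat → Int → Bool
  | [], _, _, _ => false
  | v :: r, k, j, t => (j == k && v == t) || pvMatchRow r (k + 1) j t

-- matchTab tab ki i j t : does tab (whose rows occupy row indices ki, ki+1, …) hold t at (i, j)?
def pvMatchTab : List (List Int) → Nat → Nat → Nat → Int → Bool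
  | [], _, _, _, _ => false
  | row :: rest, ki, i, j, t => (i == ki && pvMatchRow row 0 j t) || pvMatchTab rest (ki + 1) i j t

-- final cell value after processing characters cs (at word positions k, k+1, …) on top of f
def pvWCell (table : List (List Int)) (cs : List Char) (k : Nat) (f : Nat → Nat → String) (i j : Nat) : String :=
  match (table[i]?).bind (fun r => r[j]?) with
  | some v =>
    if (k : Int) + 1 ≤ v ∧ v ≤ (k : Int) + cs.length then String.mk [cs[(v - k - 1).toNat]!]
    else f i j
  | none => f i j

theorem pvGrid_congr {f g : Nat → Nat → String}
    (h : ∀ i, i < 4 → ∀ j, j < 4 → f i j = g i j) : pvGrid f = pvGrid g := by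
  simp only [pvGrid, List.range_succ, List.range_zero]
  simp only [List.map, List.nil_append, List.cons_append]
  rw [h 0 (by omega) 0 (by omega), h 0 (by omega) 1 (by omega), h 0 (by omega) 2 (by omega),
    h 0 (by omega) 3 (by omega), h 1 (by omega) 0 (by omega), h 1 (by omega) 1 (by omega),
    h 1 (by omega) 2 (by omega), h 1 (by omega) 3 (by omega), h 2 (by omega) 0 (by omega),
    h 2 (by omega) 1 (by omega), h 2 (by omega) 2 (by omega), h 2 (by omega) 3 (by omega),
    h 3 (by omega) 0 (by omega), h 3 (by omega) 1 (by omega), h 3 (by omega) 2 (by omega),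
    h 3 (by omega) 3 (by omega)]

theorem pvGrid_modify (f : Nat → Nat → String) (i j : Nat) (c : String)
    (hi : i < 4) (hj : j < 4) :
    (pvGrid f).modify i (fun row => row.set j c)
      = pvGrid (fun i' j' => if i' = i ∧ j' = j then c else f i' j') := by
  interval_cases i <;> interval_cases j <;>
    simp [pvGrid, List.range_succ, List.modify, List.set]

theorem pvMatchRow_spec (row : List Int) (k j : Nat) (t : Int) :
    pvMatchRow row k j t = true ↔
      ∃ m, ∃ hm : m < row.length, k + m = j ∧ row[m] = t := by
  induction row generalizing k with
  | nil => simp [pvMatchRow]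
  | cons v r ih =>
    simp only [pvMatchRow, Bool.or_eq_true, Bool.and_eq_true, beq_iff_eq, ih]
    constructor
    · rintro (⟨h1, h2⟩ | ⟨m, hm, h1, h2⟩)
      · exact ⟨0, by simp, by omega, by simpa using h2⟩
      · exact ⟨m + 1, by simpa using hm, by omega, by simpa using h2⟩
    · rintro ⟨m, hm, h1, h2⟩
      cases m with
      | zero => exact Or.inl ⟨by omega, by simpa using h2⟩
      | succ n => exact Or.inr ⟨n, by simpa using hm, by omega, by simpa using h2⟩

theorem pvMatchTab_spec (tab : List (List Int)) (ki i j : Nat) (t : Int) :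
    pvMatchTab tab ki i j t = true ↔
      ∃ a, ∃ ha : a < tab.length, ki + a = i ∧ ∃ hm : j < tab[a].length, tab[a][j] = t := by
  induction tab generalizing ki with
  | nil => simp [pvMatchTab]
  | cons row rest ih =>
    simp only [pvMatchTab, Bool.or_eq_true, Bool.and_eq_true, beq_iff_eq, ih,
      pvMatchRow_spec]
    constructor
    · rintro (⟨h1, m, hm, h2, h3⟩ | ⟨a, ha, h1, hm, h2⟩)
      · subst h2; exact ⟨0, by simp, by omega, by simpa using hm, by simpa using h3⟩
      · exact ⟨a + 1, by simpa using ha, by omega, by simpa using hm, by simpa using h2⟩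
    · rintro ⟨a, ha, h1, hm, h2⟩
      cases a with
      | zero =>
        exact Or.inl ⟨by omega, j, by simpa using hm, by omega, by simpa using h2⟩
      | succ n =>
        exact Or.inr ⟨n, by simpa using ha, by omega, by simpa using hm, by simpa using h2⟩

-- Inner (column) loop of A, as a grid transformation.
theorem pvRowFold (row : List Int) (k : Nat) (f : Nat → Nat → String) (i : Nat)
    (t : Int) (c : String)
    (hb : ∀ m, (hm : m < row.length) → row[m] = t → i < 4 ∧ k + m < 4) :
    (PySem.List.enumerate row (k : Int)).foldl (fun res r =>
        if r.2 = t then res.modify i (fun rw => rw.set r.1.toNat c) else res) (pvGrid f)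
      = pvGrid (fun i' j' => if i' = i ∧ pvMatchRow row k j' t then c else f i' j') := by
  induction row generalizing k f with
  | nil =>
    rw [PySem.List.enumerate_nil]
    simp only [List.foldl_nil]
    apply pvGrid_congr
    intro i' _ j' _
    simp [pvMatchRow]
  | cons v r ih =>
    rw [PySem.List.enumerate_cons]
    simp only [List.foldl_cons]
    by_cases hv : v = t
    · have hk : i < 4 ∧ k < 4 := by simpa using hb 0 (by simp) (by simpa using hv)
      rw [if_pos hv, show ((k : Int)).toNat = k by omega,
        pvGrid_modify f i k c hk.1 hk.2,
        show (k : Int) + 1 = ((k + 1 : Nat) : Int) by push_cast; ring,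
        ih (k + 1) _ (fun m hm h => by
          have := hb (m + 1) (by simpa using hm) (by simpa using h); omega)]
      apply pvGrid_congr
      intro i' _ j' _
      simp only [pvMatchRow]
      by_cases h1 : i' = i <;> by_cases h2 : pvMatchRow r (k + 1) j' t <;>
        by_cases h3 : j' = k <;> simp [h1, h2, h3, hv]
    · rw [if_neg hv,
        show (k : Int) + 1 = ((k + 1 : Nat) : Int) by push_cast; ring,
        ih (k + 1) f (fun m hm h => by
          have := hb (m + 1) (by simpa using hm) (by simpa using h); omega)]
      apply pvGrid_congr
      intro i' _ j' _
      simp only [pvMatchRow]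
      by_cases h1 : i' = i <;> by_cases h2 : pvMatchRow r (k + 1) j' t <;>
        by_cases h3 : j' = k <;> simp [h1, h2, h3, hv]

-- Middle (row) loop of A, as a grid transformation.
theorem pvTabFold (tab : List (List Int)) (ki : Nat) (f : Nat → Nat → String)
    (t : Int) (c : String)
    (hb : ∀ a, (ha : a < tab.length) → ∀ m, (hm : m < tab[a].length) →
      tab[a][m] = t → ki + a < 4 ∧ m < 4) :
    (PySem.List.enumerate tab (ki : Int)).foldl (fun res q =>
        (PySem.List.enumerate q.2 0).foldl (fun res r =>
          if r.2 = t then res.modify q.1.toNat (fun rw => rw.set r.1.toNat c) else res) res)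
      (pvGrid f)
      = pvGrid (fun i' j' => if pvMatchTab tab ki i' j' t then c else f i' j') := by
  induction tab generalizing ki f with
  | nil =>
    rw [PySem.List.enumerate_nil]
    simp only [List.foldl_nil]
    apply pvGrid_congr
    intro i' _ j' _
    simp [pvMatchTab]
  | cons row rest ih =>
    rw [PySem.List.enumerate_cons]
    simp only [List.foldl_cons]
    have hrow : ∀ m, (hm : m < row.length) → row[m] = t → ki < 4 ∧ 0 + m < 4 := by
      intro m hm h
      have := hb 0 (by simp) m (by simpa using hm) (by simpa using h); omega
    have hr := pvRowFold row 0 f ki t c hrow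
    push_cast at hr
    have hih := ih (ki + 1) (fun i' j' => if i' = ki ∧ pvMatchRow row 0 j' t then c else f i' j')
      (fun a ha m hm h => by
        have := hb (a + 1) (by simpa using ha) m (by simpa using hm) (by simpa using h)
        omega)
    push_cast at hih
    rw [show ((ki : Int)).toNat = ki by omega, hr, hih]
    apply pvGrid_congr
    intro i' _ j' _
    simp only [pvMatchTab]
    by_cases h1 : i' = ki <;> by_cases h2 : pvMatchTab rest (ki + 1) i' j' t <;>
      by_cases h3 : pvMatchRow row 0 j' t <;> simp [h1, h2, h3]

-- No-match characterisation used below.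
theorem pvMatchTab_cell (tab : List (List Int)) (i j : Nat) (t : Int) :
    pvMatchTab tab 0 i j t = true ↔
      ∃ hi : i < tab.length, ∃ hj : j < tab[i].length, tab[i][j] = t := by
  rw [pvMatchTab_spec]
  constructor
  · rintro ⟨a, ha, h1, hm, h2⟩
    have : a = i := by omega
    subst this; exact ⟨ha, hm, h2⟩
  · rintro ⟨hi, hj, h⟩; exact ⟨i, hi, by omega, hj, h⟩

-- Outer (character) loop of A: the whole computation, cell-wise.
theorem pvWordFold (table : List (List Int)) (N : Int) (cs : List Char) (k : Nat)
    (f : Nat → Nat → String)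
    (hN : (k : Int) + cs.length ≤ N)
    (hp : ∀ a, (ha : a < table.length) → ∀ m, (hm : m < table[a].length) →
      1 ≤ table[a][m] → table[a][m] ≤ N → a < 4 ∧ m < 4) :
    (PySem.List.enumerate cs (k : Int)).foldl (fun result p =>
        (PySem.List.enumerate table 0).foldl (fun result q =>
          (PySem.List.enumerate q.2 0).foldl (fun result r =>
            if r.2 = p.1 + 1 then
              result.modify q.1.toNat (fun row => row.set r.1.toNat (String.mk [p.2]))
            else result) result) result) (pvGrid f)
      = pvGrid (pvWCell table cs k f) := by
  induction cs generalizing k f with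
  | nil =>
    rw [PySem.List.enumerate_nil]
    simp only [List.foldl_nil]
    apply pvGrid_congr
    intro i _ j _
    unfold pvWCell
    cases h : (table[i]?).bind (fun r => r[j]?) with
    | none => rfl
    | some v =>
      have : ¬ ((k : Int) + 1 ≤ v ∧ v ≤ (k : Int) + ([] : List Char).length) := by
        rintro ⟨h1, h2⟩
        simp only [List.length_nil, Nat.cast_zero, add_zero] at h2
        omega
      simp only [this, if_false]
  | cons c rest ih =>
    rw [PySem.List.enumerate_cons]
    simp only [List.foldl_cons]
    have hb : ∀ a, (ha : a < table.length) → ∀ m, (hm : m < table[a].length) →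
        table[a][m] = (k : Int) + 1 → 0 + a < 4 ∧ m < 4 := by
      intro a ha m hm h
      have hlen : (1 : Int) ≤ (k : Int) + 1 := by omega
      have hle : (k : Int) + 1 ≤ N := by
        simp only [List.length_cons] at hN
        push_cast at hN
        omega
      have := hp a ha m hm (by omega) (by omega)
      omega
    have ht := pvTabFold table 0 f ((k : Int) + 1) (String.mk [c]) hb
    push_cast at ht
    have hih := ih (k + 1)
      (fun i' j' => if pvMatchTab table 0 i' j' ((k : Int) + 1) then String.mk [c] else f i' j')
      (by simp only [List.length_cons] at hN; push_cast at hN ⊢; omega)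
    push_cast at hih
    rw [ht, hih]
    apply pvGrid_congr
    intro i _ j _
    unfold pvWCell
    cases h : (table[i]?).bind (fun r => r[j]?) with
    | none =>
      have hm : pvMatchTab table 0 i j ((k : Int) + 1) = false := by
        rw [Bool.eq_false_iff]
        intro hc
        rcases (pvMatchTab_cell table i j _).mp hc with ⟨hi, hj, _⟩
        rw [List.getElem?_eq_getElem hi] at h
        simp [List.getElem?_eq_getElem hj] at h
      simp [hm]
    | some v =>
      have hv : ∃ hi : i < table.length, ∃ hj : j < table[i].length, table[i][j] = v := by
        have hil : i < table.length := by
          by_contra hc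
          rw [List.getElem?_eq_none (by omega)] at h
          simp at h
        rw [List.getElem?_eq_getElem hil] at h
        simp only [Option.bind_some] at h
        have hjl : j < table[i].length := by
          by_contra hc
          rw [List.getElem?_eq_none (by omega)] at h
          simp at h
        rw [List.getElem?_eq_getElem hjl] at h
        exact ⟨hil, hjl, by simpa using h⟩
      rcases hv with ⟨hi, hj, hvv⟩
      dsimp only
      have hmt : pvMatchTab table 0 i j ((k : Int) + 1) = true ↔ v = (k : Int) + 1 := by
        rw [pvMatchTab_cell]
        constructor
        · rintro ⟨_, _, hh⟩; rw [hvv] at hh; omega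
        · intro hh; exact ⟨hi, hj, by rw [hvv]; exact hh⟩
      by_cases hcase : v = (k : Int) + 1
      · have h1 : ((k + 1 : Nat) : Int) + 1 ≤ v ∧ v ≤ ((k + 1 : Nat) : Int) + rest.length → False := by
          push_cast; omega
        have h2 : (k : Int) + 1 ≤ v ∧ v ≤ (k : Int) + (c :: rest : List Char).length := by
          constructor
          · omega
          · simp only [List.length_cons]; push_cast; omega
        rw [if_neg h1, if_pos h2, if_pos (hmt.mpr hcase)]
        have : (v - (k : Int) - 1).toNat = 0 := by omega
        rw [this]
        simp
      · by_cases hin : ((k + 1 : Nat) : Int) + 1 ≤ v ∧ v ≤ ((k + 1 : Nat) : Int) + rest.length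
        · have h2 : (k : Int) + 1 ≤ v ∧ v ≤ (k : Int) + (c :: rest : List Char).length := by
            obtain ⟨ha, hbnd⟩ := hin
            push_cast at ha hbnd ⊢
            constructor
            · omega
            · simp only [List.length_cons]; push_cast; omega
          rw [if_pos hin, if_pos h2]
          have hx : (v - (k : Int) - 1).toNat = (v - ((k + 1 : Nat) : Int) - 1).toNat + 1 := by
            obtain ⟨ha, _⟩ := hin; push_cast at ha; omega
          rw [hx]
          simp
        · have h2 : ¬ ((k : Int) + 1 ≤ v ∧ v ≤ (k : Int) + (c :: rest : List Char).length) := by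
            push_cast at hin ⊢
            simp only [List.length_cons]
            push_cast
            omega
          rw [if_neg hin, if_neg h2, if_neg (by rw [hmt]; exact hcase)]

theorem pvInit_grid : List.replicate 4 (List.replicate 4 ".") = pvGrid (fun _ _ => ".") := by
  rfl

-- ===== VERDICT (by name: the statement is the Claim_ definition above) =====
theorem create_intermediate_table_spec : Claim_equal_create_intermediate_table := by
  intro table word _ hpre
  unfold Spec_create_intermediate_table
  unfold create_intermediate_table create_intermediate_table_alt
  have hw := pvWordFold table (word.toList.length : Int) word.toList 0 (fun _ _ => ".")
    (by push_cast; omega)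
    (fun a ha m hm h1 h2 => hpre a ha m hm h1 h2)
  push_cast at hw
  rw [pvInit_grid, hw]
  unfold pvGrid
  apply List.map_congr_left
  intro i hi
  apply List.map_congr_left
  intro j hj
  unfold pvWCell
  by_cases hil : i < table.length
  · rw [List.getElem?_eq_getElem hil]
    simp only [Option.bind_some, dif_pos hil]
    by_cases hjl : j < table[i].length
    · rw [List.getElem?_eq_getElem hjl]
      simp only [dif_pos hjl]
      push_cast
      by_cases hv : 1 ≤ table[i][j] ∧ table[i][j] ≤ (word.toList.length : Int)
      · have h0 : 1 ≤ table[i][j] ∧ table[i][j] ≤ 0 + (word.toList.length : Int) := by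
          rw [zero_add]; exact hv
        have hix : (table[i][j] - 0 - 1).toNat = (table[i][j] - 1).toNat := by omega
        rw [if_pos h0, if_pos hv, hix]
      · have h0 : ¬ (1 ≤ table[i][j] ∧ table[i][j] ≤ 0 + (word.toList.length : Int)) := by
          rw [zero_add]; exact hv
        rw [if_neg h0, if_neg hv]
    · rw [List.getElem?_eq_none (by omega)]
      simp [dif_neg hjl]
  · rw [List.getElem?_eq_none (by omega)]
    simp [dif_neg hil]
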